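-- pv_equiv track=rewrite | github.com/Mohamed-safras/nexarq-ai | nexarq_cli/cli/setup_wizard.py | _pick_ollama_model
-- ===== SOURCE A (Python) =====
-- def _pick_ollama_model(models: list[str]) -> str:
--     """Pick the best code-capable model from available Ollama models."""
--     preferred_keywords = [
--         "kimi-k2.5", "deepseek-coder", "qwen2.5-coder",
--         "codellama", "starcoder", "codegemma", "granite-code",
--         "llama3", "mistral", "phi",
--     ]
--     for kw in preferred_keywords:
--         for m in models:
--             if kw in m.lower():
--                 return m
--     return models[0] if models else "codellama:latest"
-- ===== SOURCE B (Python) =====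
-- def _pick_ollama_model(models: list[str]) -> str:
--     """Pick the best code-capable model from available Ollama models."""
--     preferred_keywords = [
--         "kimi-k2.5", "deepseek-coder", "qwen2.5-coder",
--         "codellama", "starcoder", "codegemma", "granite-code",
--         "llama3", "mistral", "phi",
--     ]
--     best_model = None
--     best_rank = len(preferred_keywords)
--     for m in models:
--         low = m.lower()
--         rank = next((i for i, kw in enumerate(preferred_keywords) if kw in low), None)
--         if rank is not None and rank < best_rank:
--             best_model, best_rank = m, rank
--     if best_model is not None:
--         return best_model
--     return models[0] if models else "codellama:latest"
-- ===== Notes on version B (the rewrite author's own statement) =====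
-- stated objective: alternative
-- what changed: Inverted the loop nesting: instead of sweeping keywords and scanning all models per keyword, B makes a single pass over models, computes each model's best keyword-priority rank, and keeps a running argmin (first model on ties), with the same fallbacks.
import Mathlib
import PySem

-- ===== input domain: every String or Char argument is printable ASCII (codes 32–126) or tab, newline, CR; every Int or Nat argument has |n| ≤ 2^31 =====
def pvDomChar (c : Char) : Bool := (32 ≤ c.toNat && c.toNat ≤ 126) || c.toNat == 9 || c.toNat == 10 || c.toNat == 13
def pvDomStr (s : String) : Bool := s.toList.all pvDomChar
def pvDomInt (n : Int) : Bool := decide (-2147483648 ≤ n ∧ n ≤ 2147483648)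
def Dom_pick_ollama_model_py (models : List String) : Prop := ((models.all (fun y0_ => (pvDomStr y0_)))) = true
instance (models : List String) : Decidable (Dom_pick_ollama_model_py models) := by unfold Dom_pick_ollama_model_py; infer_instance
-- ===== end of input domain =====

-- B inverts A's loop nesting: one pass over models keeping a running best keyword-priority
-- rank (argmin, first model on ties) instead of sweeping keywords with an inner model scan.

def pvKeywords : List String :=
  ["kimi-k2.5", "deepseek-coder", "qwen2.5-coder",
   "codellama", "starcoder", "codegemma", "granite-code",
   "llama3", "mistral", "phi"]

-- ===== PORT A =====
-- outer loop "for kw in preferred_keywords"; inner "for m in models: if kw in m.lower(): return m"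
def pvPickAGo (models : List String) : List String → Option String
  | [] => none
  | kw :: rest =>
    match models.find? (fun m => PySem.Str.isIn kw (PySem.Str.lower m)) with
    | some m => some m
    | none => pvPickAGo models rest

def pick_ollama_model_py (models : List String) : String :=
  match pvPickAGo models pvKeywords with
  | some m => m
  | none => match models with
            | [] => "codellama:latest"
            | m :: _ => m

-- ===== PORT B =====
-- rank of a model: index of the first keyword contained in its lowercased name
def pvRankGo : List String → Nat → String → Option Nat
  | [], _, _ => none
  | kw :: rest, i, low =>
    if PySem.Str.isIn kw low then some i else pvRankGo rest (i + 1) low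

-- one loop-body step: update (best_model, best_rank)
def pvStep (kws : List String) (acc : Option String × Nat) (m : String) : Option String × Nat :=
  match pvRankGo kws 0 (PySem.Str.lower m) with
  | none => acc
  | some r => if r < acc.2 then (some m, r) else acc

def pick_ollama_model_py_alt (models : List String) : String :=
  let st := models.foldl (pvStep pvKeywords) (none, pvKeywords.length)
  match st.1 with
  | some bm => bm
  | none => match models with
            | [] => "codellama:latest"
            | m :: _ => m

-- ===== PRECONDITION & SPEC =====
def Spec_pick_ollama_model_py (models : List String) (out : String) : Prop := out = pick_ollama_model_py_alt models
instance (models : List String) (out : String) : Decidable (Spec_pick_ollama_model_py models out) := by unfold Spec_pick_ollama_model_py; infer_instance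

-- ===== CLAIM (what is proved, stated in full; the proofs are below) =====
def Claim_equal_pick_ollama_model_py : Prop := ∀ (models : List String), Dom_pick_ollama_model_py models → Spec_pick_ollama_model_py models (pick_ollama_model_py models)

-- ===== LEMMAS AND PROOFS =====

theorem pvRankGo_shift (kws : List String) (i : Nat) (low : String) :
    pvRankGo kws i low = (pvRankGo kws 0 low).map (· + i) := by
  induction kws generalizing i with
  | nil => rfl
  | cons kw rest ih =>
    simp only [pvRankGo]
    by_cases h : PySem.Str.isIn kw low = true
    · rw [if_pos h, if_pos h]; simp
    · rw [if_neg h, if_neg h, ih (i + 1), ih 1]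
      cases pvRankGo rest 0 low with
      | none => rfl
      | some r => simp only [Option.map_some]; congr 1; omega

theorem pvRankGo_cons (kw : String) (rest : List String) (low : String) :
    pvRankGo (kw :: rest) 0 low =
      if PySem.Str.isIn kw low then some 0
      else (pvRankGo rest 0 low).map (· + 1) := by
  simp only [pvRankGo]
  rw [pvRankGo_shift rest 1 low]

theorem pv_zero_locks (kws : List String) (models : List String) (bm : String) :
    models.foldl (pvStep kws) (some bm, 0) = (some bm, 0) := by
  induction models with
  | nil => rfl
  | cons m ms ih =>
    have : pvStep kws (some bm, 0) m = (some bm, 0) := by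
      unfold pvStep
      cases pvRankGo kws 0 (PySem.Str.lower m) <;> simp
    simp [List.foldl_cons, this, ih]

theorem pv_nil_kws (models : List String) (acc : Option String × Nat) :
    models.foldl (pvStep []) acc = acc := by
  induction models generalizing acc with
  | nil => rfl
  | cons m ms ih => simp [List.foldl_cons, pvStep, pvRankGo, ih]

theorem pv_first_match (kw : String) (rest : List String) (models : List String)
    (acc : Option String × Nat) (m0 : String) (hb : 1 ≤ acc.2)
    (hf : models.find? (fun m => PySem.Str.isIn kw (PySem.Str.lower m)) = some m0) :
    (models.foldl (pvStep (kw :: rest)) acc).1 = some m0 := by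
  induction models generalizing acc with
  | nil => simp at hf
  | cons m ms ih =>
    by_cases h : PySem.Str.isIn kw (PySem.Str.lower m) = true
    · rw [List.find?_cons_of_pos (p := fun m => PySem.Str.isIn kw (PySem.Str.lower m)) h] at hf
      injection hf with hf; subst hf
      have hstep : pvStep (kw :: rest) acc m = (some m, 0) := by
        unfold pvStep
        rw [pvRankGo_cons, if_pos h]
        simp only []
        rw [if_pos (Nat.lt_of_lt_of_le Nat.zero_lt_one hb)]
      rw [List.foldl_cons, hstep, pv_zero_locks]
    · rw [List.find?_cons_of_neg (p := fun m => PySem.Str.isIn kw (PySem.Str.lower m)) h] at hf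
      rw [List.foldl_cons]
      have hr : pvRankGo (kw :: rest) 0 (PySem.Str.lower m)
          = (pvRankGo rest 0 (PySem.Str.lower m)).map (· + 1) := by
        rw [pvRankGo_cons, if_neg h]
      have hacc : 1 ≤ (pvStep (kw :: rest) acc m).2 := by
        unfold pvStep
        rw [hr]
        cases pvRankGo rest 0 (PySem.Str.lower m) with
        | none => simpa using hb
        | some r =>
          simp only [Option.map_some]
          split
          · simp
          · simpa using hb
      exact ih _ hacc hf

theorem pv_shift_fold (kw : String) (rest : List String) (models : List String)
    (om : Option String) (b : Nat)
    (h : ∀ m ∈ models, PySem.Str.isIn kw (PySem.Str.lower m) = false) :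
    models.foldl (pvStep (kw :: rest)) (om, b + 1) =
      ((models.foldl (pvStep rest) (om, b)).1,
       (models.foldl (pvStep rest) (om, b)).2 + 1) := by
  induction models generalizing om b with
  | nil => rfl
  | cons m ms ih =>
    have hm : PySem.Str.isIn kw (PySem.Str.lower m) = false := h m (List.mem_cons_self ..)
    have hms : ∀ m' ∈ ms, PySem.Str.isIn kw (PySem.Str.lower m') = false :=
      fun m' hmem => h m' (List.mem_cons_of_mem _ hmem)
    rw [List.foldl_cons, List.foldl_cons]
    have hr : pvRankGo (kw :: rest) 0 (PySem.Str.lower m)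
        = (pvRankGo rest 0 (PySem.Str.lower m)).map (· + 1) := by
      rw [pvRankGo_cons, if_neg (by rw [hm]; simp)]
    cases hcase : pvRankGo rest 0 (PySem.Str.lower m) with
    | none =>
      have h1 : pvStep (kw :: rest) (om, b + 1) m = (om, b + 1) := by
        unfold pvStep; rw [hr, hcase]; rfl
      have h2 : pvStep rest (om, b) m = (om, b) := by
        unfold pvStep; rw [hcase]
      rw [h1, h2]; exact ih om b hms
    | some r =>
      have h1 : pvStep (kw :: rest) (om, b + 1) m
          = if r < b then (some m, r + 1) else (om, b + 1) := by
        unfold pvStep; rw [hr, hcase]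
        simp only [Option.map_some]
        by_cases hlt : r < b
        · rw [if_pos (by omega), if_pos hlt]
        · rw [if_neg (by omega), if_neg hlt]
      have h2 : pvStep rest (om, b) m = if r < b then (some m, r) else (om, b) := by
        unfold pvStep; rw [hcase]
      rw [h1, h2]
      by_cases hlt : r < b
      · rw [if_pos hlt, if_pos hlt]; exact ih (some m) r hms
      · rw [if_neg hlt, if_neg hlt]; exact ih om b hms

theorem pv_core_eq (kws models : List String) :
    pvPickAGo models kws = (models.foldl (pvStep kws) (none, kws.length)).1 := by
  induction kws with
  | nil => rw [pv_nil_kws]; rfl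
  | cons kw rest ih =>
    cases hf : models.find? (fun m => PySem.Str.isIn kw (PySem.Str.lower m)) with
    | some m0 =>
      have h1 : pvPickAGo models (kw :: rest) = some m0 := by
        simp only [pvPickAGo]; rw [hf]
      rw [h1, pv_first_match kw rest models _ m0 (by simp) hf]
    | none =>
      have h1 : pvPickAGo models (kw :: rest) = pvPickAGo models rest := by
        simp only [pvPickAGo]; rw [hf]
      have hall : ∀ m ∈ models, PySem.Str.isIn kw (PySem.Str.lower m) = false := by
        intro m hm
        have := List.find?_eq_none.mp hf m hm
        simpa using this
      have h2 : (kw :: rest).length = rest.length + 1 := rfl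
      rw [h1, ih, h2, pv_shift_fold kw rest models none rest.length hall]

-- ===== VERDICT (by name: the statement is the Claim_ definition above) =====
theorem pick_ollama_model_py_spec : Claim_equal_pick_ollama_model_py := by
  intro models _
  unfold Spec_pick_ollama_model_py pick_ollama_model_py pick_ollama_model_py_alt
  rw [pv_core_eq pvKeywords models]
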